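-- pv_equiv track=rewrite | github.com/N1ghthill/master-control | mastercontrol/context/events.py | _parse_udev_export_db
-- ===== SOURCE A (Python) =====
-- def _parse_udev_export_db(stdout: str) -> dict[str, list[str]]:
--     state = {"net": [], "block": [], "usb": []}
--     current: dict[str, str] = {}
--
--     def flush(entry: dict[str, str]) -> None:
--         subsystem = str(entry.get("SUBSYSTEM", "")).strip().lower()
--         if subsystem == "net":
--             name = entry.get("INTERFACE") or entry.get("N") or entry.get("DEVNAME") or ""
--             if name:
--                 state["net"].append(name)
--         elif subsystem == "block":
--             name = entry.get("DEVNAME") or entry.get("N") or ""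
--             if name:
--                 state["block"].append(name)
--         elif subsystem == "usb":
--             name = entry.get("ID_MODEL") or entry.get("PRODUCT") or entry.get("DEVNAME") or entry.get("P") or ""
--             if name:
--                 state["usb"].append(name)
--
--     for line in stdout.splitlines() + [""]:
--         stripped = line.rstrip()
--         if not stripped:
--             if current:
--                 flush(current)
--             current = {}
--             continue
--         if stripped.startswith("N: "):
--             current["N"] = stripped[3:].strip()
--             continue
--         if stripped.startswith("P: "):
--             current["P"] = stripped[3:].strip()
--             continue
--         if stripped.startswith("E: "):
--             key, _, value = stripped[3:].partition("=")
--             current[key.strip()] = value.strip()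
--
--     for key in state:
--         state[key] = sorted(set(item for item in state[key] if item))
--     return state
-- ===== SOURCE B (Python) =====
-- def _parse_udev_export_db(stdout: str) -> dict[str, list[str]]:
--     # Phase 1: group lines into records (maximal runs of lines whose rstrip() is non-blank).
--     records: list[list[str]] = []
--     cur: list[str] = []
--     for line in stdout.splitlines():
--         if line.rstrip():
--             cur.append(line)
--         elif cur:
--             records.append(cur)
--             cur = []
--     if cur:
--         records.append(cur)
--
--     # Value of `key` in a record: the last line that assigns it wins (dict-overwrite
--     # semantics), so scan the record backwards; "" when no line assigns it.
--     def value_of(rec: list[str], key: str) -> str: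
--         for line in reversed(rec):
--             s = line.rstrip()
--             if s.startswith("N: "):
--                 if key == "N":
--                     return s[3:].strip()
--             elif s.startswith("P: "):
--                 if key == "P":
--                     return s[3:].strip()
--             elif s.startswith("E: "):
--                 k, _, v = s[3:].partition("=")
--                 if k.strip() == key:
--                     return v.strip()
--         return ""
--
--     def first_nonempty(*candidates: str) -> str:
--         for c in candidates:
--             if c:
--                 return c
--         return ""
--
--     net: list[str] = []
--     block: list[str] = []
--     usb: list[str] = []
--     for rec in records:
--         subsystem = value_of(rec, "SUBSYSTEM").strip().lower()
--         if subsystem == "net":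
--             name = first_nonempty(value_of(rec, "INTERFACE"), value_of(rec, "N"),
--                                   value_of(rec, "DEVNAME"))
--             if name:
--                 net.append(name)
--         elif subsystem == "block":
--             name = first_nonempty(value_of(rec, "DEVNAME"), value_of(rec, "N"))
--             if name:
--                 block.append(name)
--         elif subsystem == "usb":
--             name = first_nonempty(value_of(rec, "ID_MODEL"), value_of(rec, "PRODUCT"),
--                                   value_of(rec, "DEVNAME"), value_of(rec, "P"))
--             if name:
--                 usb.append(name)
--
--     return {"net": sorted(set(net)), "block": sorted(set(block)), "usb": sorted(set(usb))}
-- ===== Notes on version B (the rewrite author's own statement) =====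
-- stated objective: alternative
-- what changed: B splits the output into blank-separated records first and resolves each key by a backwards scan of the record's lines (last assignment wins) instead of A's single pass that mutates a current dict and flushes it on every blank line.
import Mathlib
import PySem

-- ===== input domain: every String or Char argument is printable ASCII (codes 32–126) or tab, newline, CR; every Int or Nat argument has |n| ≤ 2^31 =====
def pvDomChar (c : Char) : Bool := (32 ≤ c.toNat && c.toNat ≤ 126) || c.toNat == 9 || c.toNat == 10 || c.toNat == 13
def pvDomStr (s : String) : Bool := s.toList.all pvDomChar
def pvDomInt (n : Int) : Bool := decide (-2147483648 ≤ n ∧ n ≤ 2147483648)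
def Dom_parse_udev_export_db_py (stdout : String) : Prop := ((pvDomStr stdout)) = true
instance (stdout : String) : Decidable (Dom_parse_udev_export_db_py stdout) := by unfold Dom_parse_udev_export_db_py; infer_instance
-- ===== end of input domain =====

-- B re-decomposes A's single flush-on-blank pass into two phases (group lines into records,
-- then resolve each key by a backwards scan of the record instead of building a dict);
-- objective: alternative decomposition, same asymptotic cost.

-- ===== PORT A =====

-- hand-port of s.partition("=") restricted to the (before, after) components the Python uses;
-- exact: split at the FIRST '=', ("s","") when absent
def pvPartEq (t : String) : String × String :=
  let i := PySem.Str.find t "="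
  if i = -1 then (t, "")
  else (PySem.Str.slice t none (some i), PySem.Str.slice t (some (i + 1)) none)

-- Python `x or y` on strings: "" (and a missing key's None) is falsy, so
-- `entry.get(k) or …` is exactly `pvOr (entry.getD k "") …`
def pvOr (a b : String) : String := if a = "" then b else a

-- A's inner `flush(entry)` (the `state[…].append` becomes Dict.modify; the keys are always present)
def pvFlushA (state : PySem.Dict String (List String)) (entry : PySem.Dict String String) :
    PySem.Dict String (List String) :=
  let subsystem := PySem.Str.lower (PySem.Str.strip (entry.getD "SUBSYSTEM" ""))
  if subsystem = "net" then
    let name := pvOr (entry.getD "INTERFACE" "") (pvOr (entry.getD "N" "") (entry.getD "DEVNAME" ""))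
    if name ≠ "" then state.modify "net" [] (· ++ [name]) else state
  else if subsystem = "block" then
    let name := pvOr (entry.getD "DEVNAME" "") (entry.getD "N" "")
    if name ≠ "" then state.modify "block" [] (· ++ [name]) else state
  else if subsystem = "usb" then
    let name := pvOr (entry.getD "ID_MODEL" "")
      (pvOr (entry.getD "PRODUCT" "") (pvOr (entry.getD "DEVNAME" "") (entry.getD "P" "")))
    if name ≠ "" then state.modify "usb" [] (· ++ [name]) else state
  else state

-- the body of A's `for line in stdout.splitlines() + [""]` loop; state = (state, current)
def pvStepA (s : PySem.Dict String (List String) × PySem.Dict String String) (line : String) :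
    PySem.Dict String (List String) × PySem.Dict String String :=
  let stripped := PySem.Str.rstrip line
  if stripped = "" then
    (if s.2.items.isEmpty then s.1 else pvFlushA s.1 s.2, PySem.Dict.empty)
  else if PySem.Str.startswith stripped "N: " then
    (s.1, s.2.insert "N" (PySem.Str.strip (PySem.Str.slice stripped (some 3) none)))
  else if PySem.Str.startswith stripped "P: " then
    (s.1, s.2.insert "P" (PySem.Str.strip (PySem.Str.slice stripped (some 3) none)))
  else if PySem.Str.startswith stripped "E: " then
    let kv := pvPartEq (PySem.Str.slice stripped (some 3) none)
    (s.1, s.2.insert (PySem.Str.strip kv.1) (PySem.Str.strip kv.2))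
  else s

def parse_udev_export_db_py (stdout : String) : List (String × List String) :=
  let init : PySem.Dict String (List String) :=
    ((PySem.Dict.empty.insert "net" []).insert "block" []).insert "usb" []
  let r := (PySem.Str.splitlines stdout ++ [""]).foldl pvStepA (init, PySem.Dict.empty)
  let state := r.1
  -- for key in state: state[key] = sorted(set(item for item in state[key] if item))
  (state.keys.foldl (fun st key =>
    st.insert key (PySem.List.sorted
      (PySem.Set.ofList ((st.getD key []).filter (fun item => item ≠ "")))
      (fun x => x) false)) state).items

-- ===== PORT B =====

-- B's grouping loop: state = (records, cur)
def pvGroupStep (s : List (List String) × List String) (line : String) :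
    List (List String) × List String :=
  if PySem.Str.rstrip line ≠ "" then (s.1, s.2 ++ [line])
  else if s.2 ≠ [] then (s.1 ++ [s.2], []) else s

-- B's `value_of` loop over reversed(rec) (early return = structural recursion)
def pvValueOfGo (key : String) : List String → String
  | [] => ""
  | line :: rest =>
    let s := PySem.Str.rstrip line
    if PySem.Str.startswith s "N: " then
      if key = "N" then PySem.Str.strip (PySem.Str.slice s (some 3) none) else pvValueOfGo key rest
    else if PySem.Str.startswith s "P: " then
      if key = "P" then PySem.Str.strip (PySem.Str.slice s (some 3) none) else pvValueOfGo key rest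
    else if PySem.Str.startswith s "E: " then
      let kv := pvPartEq (PySem.Str.slice s (some 3) none)
      if PySem.Str.strip kv.1 = key then PySem.Str.strip kv.2 else pvValueOfGo key rest
    else pvValueOfGo key rest

def pvValueOf (rec : List String) (key : String) : String := pvValueOfGo key rec.reverse

-- B's first_nonempty(*candidates)
def pvFirstNonempty : List String → String
  | [] => ""
  | c :: rest => if c ≠ "" then c else pvFirstNonempty rest

-- B's per-record dispatch; state = (net, block, usb)
def pvDispatchB (t : List String × List String × List String) (rec : List String) :
    List String × List String × List String :=
  let subsystem := PySem.Str.lower (PySem.Str.strip (pvValueOf rec "SUBSYSTEM"))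
  if subsystem = "net" then
    let name := pvFirstNonempty
      [pvValueOf rec "INTERFACE", pvValueOf rec "N", pvValueOf rec "DEVNAME"]
    if name ≠ "" then (t.1 ++ [name], t.2.1, t.2.2) else t
  else if subsystem = "block" then
    let name := pvFirstNonempty [pvValueOf rec "DEVNAME", pvValueOf rec "N"]
    if name ≠ "" then (t.1, t.2.1 ++ [name], t.2.2) else t
  else if subsystem = "usb" then
    let name := pvFirstNonempty
      [pvValueOf rec "ID_MODEL", pvValueOf rec "PRODUCT", pvValueOf rec "DEVNAME", pvValueOf rec "P"]
    if name ≠ "" then (t.1, t.2.1, t.2.2 ++ [name]) else t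
  else t

def parse_udev_export_db_py_alt (stdout : String) : List (String × List String) :=
  let g := (PySem.Str.splitlines stdout).foldl pvGroupStep ([], [])
  let records := if g.2 ≠ [] then g.1 ++ [g.2] else g.1
  let t := records.foldl pvDispatchB ([], [], [])
  [("net", PySem.List.sorted (PySem.Set.ofList t.1) (fun x => x) false),
   ("block", PySem.List.sorted (PySem.Set.ofList t.2.1) (fun x => x) false),
   ("usb", PySem.List.sorted (PySem.Set.ofList t.2.2) (fun x => x) false)]

-- ===== PRECONDITION & SPEC =====
def Spec_parse_udev_export_db_py (stdout : String) (out : List (String × List String)) : Prop := out = parse_udev_export_db_py_alt stdout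
instance (stdout : String) (out : List (String × List String)) : Decidable (Spec_parse_udev_export_db_py stdout out) := by unfold Spec_parse_udev_export_db_py; infer_instance

-- ===== CLAIM (what is proved, stated in full; the proofs are below) =====
def Claim_equal_parse_udev_export_db_py : Prop := ∀ (stdout : String), Dom_parse_udev_export_db_py stdout → Spec_parse_udev_export_db_py stdout (parse_udev_export_db_py stdout)

-- ===== LEMMAS AND PROOFS =====

-- which (key, value) a non-ignored line assigns, if any
def pvSetOf (l : String) : Option (String × String) :=
  let s := PySem.Str.rstrip l
  if PySem.Str.startswith s "N: " then some ("N", PySem.Str.strip (PySem.Str.slice s (some 3) none))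
  else if PySem.Str.startswith s "P: " then some ("P", PySem.Str.strip (PySem.Str.slice s (some 3) none))
  else if PySem.Str.startswith s "E: " then
    let kv := pvPartEq (PySem.Str.slice s (some 3) none)
    some (PySem.Str.strip kv.1, PySem.Str.strip kv.2)
  else none

-- the effect of a non-blank line on A's `current` dict
def pvEStep (cur : PySem.Dict String String) (l : String) : PySem.Dict String String :=
  match pvSetOf l with
  | some kv => cur.insert kv.1 kv.2
  | none => cur

def pvEntry (rec : List String) : PySem.Dict String String :=
  rec.foldl pvEStep PySem.Dict.empty

-- the sequence of `current` dicts A flushes (including empty ones, which flush ignores)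
def pvRecs (cur : PySem.Dict String String) : List String → List (PySem.Dict String String)
  | [] => [cur]
  | l :: ls =>
    if PySem.Str.rstrip l = "" then cur :: pvRecs PySem.Dict.empty ls
    else pvRecs (pvEStep cur l) ls

def pvFlushG (st : PySem.Dict String (List String)) (e : PySem.Dict String String) :
    PySem.Dict String (List String) :=
  if e.items.isEmpty then st else pvFlushA st e

theorem pvStepA_nonblank (st : PySem.Dict String (List String)) (cur : PySem.Dict String String)
    (l : String) (h : PySem.Str.rstrip l ≠ "") :
    pvStepA (st, cur) l = (st, pvEStep cur l) := by
  simp only [pvStepA, pvEStep, pvSetOf, h, if_false]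
  split_ifs <;> rfl

theorem pvFlushA_empty (st : PySem.Dict String (List String)) :
    pvFlushA st PySem.Dict.empty = st := by
  unfold pvFlushA
  rw [show PySem.Str.lower (PySem.Str.strip (PySem.Dict.getD PySem.Dict.empty "SUBSYSTEM" "")) = ""
      from rfl]
  simp

theorem pvFlushG_eq (st : PySem.Dict String (List String)) (e : PySem.Dict String String) :
    pvFlushG st e = pvFlushA st e := by
  unfold pvFlushG
  split_ifs with h
  · have : e = PySem.Dict.empty := by
      apply PySem.Dict.ext
      simpa [List.isEmpty_iff] using h
    rw [this, pvFlushA_empty]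
  · rfl

-- A's loop over (lines ++ [""]) is the fold of flush over the record dicts
theorem pvL1 (ls : List String) : ∀ (st : PySem.Dict String (List String))
    (cur : PySem.Dict String String),
    (ls ++ [""]).foldl pvStepA (st, cur) = ((pvRecs cur ls).foldl pvFlushG st, PySem.Dict.empty) := by
  induction ls with
  | nil =>
    intro st cur
    simp only [List.nil_append, List.foldl_cons, List.foldl_nil, pvRecs]
    simp only [pvStepA, pvFlushG]
    rfl
  | cons l ls ih =>
    intro st cur
    by_cases h : PySem.Str.rstrip l = ""
    · have hstep : pvStepA (st, cur) l = (pvFlushG st cur, PySem.Dict.empty) := by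
        simp only [pvStepA, pvFlushG, h, if_true]
      simp only [List.cons_append, List.foldl_cons, hstep, ih, pvRecs, h, if_true,
        List.foldl_cons]
    · simp only [List.cons_append, List.foldl_cons, pvStepA_nonblank st cur l h, ih,
        pvRecs, h, if_false]

-- a group fold started with an accumulated prefix of records just prepends it
theorem pvL4 (ls : List String) : ∀ (recs : List (List String)) (cur : List String),
    ls.foldl pvGroupStep (recs, cur)
      = (recs ++ (ls.foldl pvGroupStep ([], cur)).1, (ls.foldl pvGroupStep ([], cur)).2) := by
  induction ls with
  | nil => intro recs cur; simp
  | cons l ls ih =>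
    intro recs cur
    simp only [List.foldl_cons, pvGroupStep, List.nil_append]
    split_ifs with h hc
    · exact ih recs (cur ++ [l])
    · rw [ih (recs ++ [cur]) [], ih [cur] []]
      simp
    · exact ih recs cur

def pvFinalize (g : List (List String) × List String) : List (List String) :=
  if g.2 ≠ [] then g.1 ++ [g.2] else g.1

-- flushing A's record dicts = flushing the entry of each of B's grouped records
theorem pvL5 (ls : List String) : ∀ (st : PySem.Dict String (List String)) (curL : List String),
    (pvRecs (pvEntry curL) ls).foldl pvFlushA st
      = (pvFinalize (ls.foldl pvGroupStep ([], curL))).foldl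
          (fun st rec => pvFlushA st (pvEntry rec)) st := by
  induction ls with
  | nil =>
    intro st curL
    simp only [pvRecs, List.foldl_cons, List.foldl_nil, pvFinalize]
    by_cases hc : curL = []
    · simp [hc, pvEntry, pvFlushA_empty]
    · simp [hc]
  | cons l ls ih =>
    intro st curL
    by_cases h : PySem.Str.rstrip l = ""
    · by_cases hc : curL = []
      · subst hc
        simp only [pvRecs, h, if_true, List.foldl_cons]
        rw [show pvEntry ([] : List String) = PySem.Dict.empty from rfl, pvFlushA_empty]
        have hstep : pvGroupStep ([], ([] : List String)) l = ([], []) := by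
          simp [pvGroupStep, h]
        rw [hstep]
        rw [show (PySem.Dict.empty : PySem.Dict String String) = pvEntry [] from rfl]
        exact ih st []
      · simp only [pvRecs, h, if_true, List.foldl_cons]
        rw [show (PySem.Dict.empty : PySem.Dict String String) = pvEntry [] from rfl]
        rw [ih (pvFlushA st (pvEntry curL)) []]
        have hstep : pvGroupStep ([], curL) l = ([curL], []) := by
          simp [pvGroupStep, h, hc]
        rw [hstep, pvL4 ls [curL] []]
        rcases hx : ls.foldl pvGroupStep ([], []) with ⟨xr, xc⟩
        by_cases hxc : xc = [] <;>
          simp [pvFinalize, hxc, List.foldl_cons]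
    · simp only [pvRecs, h, if_false, List.foldl_cons]
      have hE : pvEStep (pvEntry curL) l = pvEntry (curL ++ [l]) := by
        simp [pvEntry, List.foldl_append]
      have hstep : pvGroupStep ([], curL) l = ([], curL ++ [l]) := by
        simp [pvGroupStep, h]
      rw [hE, hstep]
      exact ih st (curL ++ [l])

-- dict lookup in A's entry = B's backwards scan
theorem pvGo_cons (key l : String) (t : List String) :
    pvValueOfGo key (l :: t) = match pvSetOf l with
      | some kv => if kv.1 = key then kv.2 else pvValueOfGo key t
      | none => pvValueOfGo key t := by
  simp only [pvValueOfGo, pvSetOf]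
  split_ifs with h1 h2 h3 h4 h5 h6 _h7 <;> simp [eq_comm] <;>
    (intro hc
     first
     | exact False.elim (hc h2) | exact False.elim (h2 hc)
     | exact False.elim (hc h4) | exact False.elim (h4 hc)
     | exact False.elim (hc h6.symm) | exact False.elim (h6 hc.symm))

theorem pvV (key : String) (rec : List String) :
    (pvEntry rec).getD key "" = pvValueOf rec key := by
  induction rec using List.reverseRecOn with
  | nil => rfl
  | append_singleton rs l ih =>
    simp only [pvEntry, List.foldl_append, List.foldl_cons, List.foldl_nil] at *
    simp only [pvValueOf, List.reverse_append, List.reverse_cons, List.reverse_nil,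
      List.nil_append, List.singleton_append] at *
    rw [pvGo_cons]
    unfold pvEStep
    cases h : pvSetOf l with
    | none => simpa using ih
    | some kv =>
      simp only [PySem.Dict.getD_insert]
      by_cases hk : key = kv.1
      · simp [hk]
      · rw [if_neg hk, if_neg (fun he => hk he.symm)]
        exact ih

-- the three-list state dict A threads through its loop
def pvSt (a b c : List String) : PySem.Dict String (List String) :=
  PySem.Dict.mk [("net", a), ("block", b), ("usb", c)]

-- pvFirstNonempty on the literal candidate lists = A's pvOr chains
theorem pvFN2 (x y : String) : pvFirstNonempty [x, y] = pvOr x y := by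
  simp only [pvFirstNonempty, pvOr, ite_not]
  split_ifs <;> simp_all

theorem pvFN3 (x y z : String) : pvFirstNonempty [x, y, z] = pvOr x (pvOr y z) := by
  simp only [pvFirstNonempty, pvOr, ite_not]
  split_ifs <;> simp_all

theorem pvFN4 (x y z w : String) :
    pvFirstNonempty [x, y, z, w] = pvOr x (pvOr y (pvOr z w)) := by
  simp only [pvFirstNonempty, pvOr, ite_not]
  split_ifs <;> simp_all

theorem pvSt_mod_net (a b c x : List String) :
    (pvSt a b c).modify "net" [] (· ++ x) = pvSt (a ++ x) b c := by
  simp [pvSt, PySem.Dict.modify, PySem.Dict.insert, PySem.Dict.getD, PySem.Dict.get?,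
    PySem.Dict.contains]

theorem pvSt_mod_block (a b c x : List String) :
    (pvSt a b c).modify "block" [] (· ++ x) = pvSt a (b ++ x) c := by
  simp [pvSt, PySem.Dict.modify, PySem.Dict.insert, PySem.Dict.getD, PySem.Dict.get?,
    PySem.Dict.contains]

theorem pvSt_mod_usb (a b c x : List String) :
    (pvSt a b c).modify "usb" [] (· ++ x) = pvSt a b (c ++ x) := by
  simp [pvSt, PySem.Dict.modify, PySem.Dict.insert, PySem.Dict.getD, PySem.Dict.get?,
    PySem.Dict.contains]

-- one flush on the state dict = one of B's dispatch steps on the three lists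
theorem pvLD (a b c : List String) (rec : List String) :
    pvFlushA (pvSt a b c) (pvEntry rec)
      = (fun t => pvSt t.1 t.2.1 t.2.2) (pvDispatchB (a, b, c) rec) := by
  simp only [pvFlushA, pvDispatchB, pvV, pvFN2, pvFN3, pvFN4]
  split_ifs with h1 h2 h3 h4 h5 h6 <;>
    simp_all [pvSt_mod_net, pvSt_mod_block, pvSt_mod_usb]

theorem pvL6 (recs : List (List String)) : ∀ (a b c : List String),
    recs.foldl (fun st rec => pvFlushA st (pvEntry rec)) (pvSt a b c)
      = (fun t => pvSt t.1 t.2.1 t.2.2) (recs.foldl pvDispatchB (a, b, c)) := by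
  induction recs with
  | nil => intro a b c; rfl
  | cons rec recs ih =>
    intro a b c
    rcases h : pvDispatchB (a, b, c) rec with ⟨a', b', c'⟩
    simp only [List.foldl_cons, pvLD, h, ih]

-- every collected name is non-empty (the `if name:` guard)
theorem pvN_step (t : List String × List String × List String) (rec : List String) :
    (∀ x ∈ (pvDispatchB t rec).1, x ∈ t.1 ∨ x ≠ "") ∧
    (∀ x ∈ (pvDispatchB t rec).2.1, x ∈ t.2.1 ∨ x ≠ "") ∧
    (∀ x ∈ (pvDispatchB t rec).2.2, x ∈ t.2.2 ∨ x ≠ "") := by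
  obtain ⟨t1, t2, t3⟩ := t
  simp only [pvDispatchB]
  split_ifs with h1 h2 h3 h4 h5 h6 <;>
    refine ⟨fun x hx => ?_, fun x hx => ?_, fun x hx => ?_⟩ <;>
    simp only [List.mem_append, List.mem_singleton] at hx <;>
    first
    | exact Or.inl hx
    | (rcases hx with hx | hx
       · exact Or.inl hx
       · subst hx; right; assumption)

theorem pvN (recs : List (List String)) : ∀ (t : List String × List String × List String),
    (∀ x ∈ t.1, x ≠ "") → (∀ x ∈ t.2.1, x ≠ "") → (∀ x ∈ t.2.2, x ≠ "") →
    (∀ x ∈ (recs.foldl pvDispatchB t).1, x ≠ "") ∧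
    (∀ x ∈ (recs.foldl pvDispatchB t).2.1, x ≠ "") ∧
    (∀ x ∈ (recs.foldl pvDispatchB t).2.2, x ≠ "") := by
  induction recs with
  | nil => intro t h1 h2 h3; exact ⟨h1, h2, h3⟩
  | cons rec recs ih =>
    intro t h1 h2 h3
    simp only [List.foldl_cons]
    obtain ⟨s1, s2, s3⟩ := pvN_step t rec
    exact ih (pvDispatchB t rec)
      (fun x hx => (s1 x hx).elim (h1 x) id)
      (fun x hx => (s2 x hx).elim (h2 x) id)
      (fun x hx => (s3 x hx).elim (h3 x) id)

-- ===== VERDICT (by name: the statement is the Claim_ definition above) =====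
theorem parse_udev_export_db_py_spec : Claim_equal_parse_udev_export_db_py := by
  intro stdout _
  unfold Spec_parse_udev_export_db_py
  simp only [parse_udev_export_db_py, parse_udev_export_db_py_alt]
  rw [show ((PySem.Dict.empty.insert "net" []).insert "block" []).insert "usb" ([] : List String)
      = pvSt [] [] [] from rfl]
  rw [pvL1, show pvFlushG = pvFlushA from funext fun st => funext fun e => pvFlushG_eq st e]
  rw [show (PySem.Dict.empty : PySem.Dict String String) = pvEntry [] from rfl, pvL5]
  rcases hg : (PySem.Str.splitlines stdout).foldl pvGroupStep ([], []) with ⟨grecs, gcur⟩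
  simp only [pvFinalize]
  rcases ht : (if gcur ≠ [] then grecs ++ [gcur] else grecs).foldl pvDispatchB ([], [], [])
    with ⟨n, b, u⟩
  have h6 := pvL6 (if gcur ≠ [] then grecs ++ [gcur] else grecs) [] [] []
  rw [ht] at h6
  simp only [ne_eq] at h6 ht ⊢
  rw [h6]
  have hne := pvN (if gcur ≠ [] then grecs ++ [gcur] else grecs) ([], [], [])
    (by simp) (by simp) (by simp)
  simp only [ne_eq] at hne
  rw [ht] at hne
  obtain ⟨hn, hb, hu⟩ := hne
  have hkeys : (pvSt n b u).keys = ["net", "block", "usb"] := by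
    simp [pvSt, PySem.Dict.keys]
  rw [hkeys]
  simp only [List.foldl_cons, List.foldl_nil]
  have hfn : n.filter (fun item => !decide (item = "")) = n :=
    List.filter_eq_self.mpr (fun a ha => by simpa using hn a ha)
  have hfb : b.filter (fun item => !decide (item = "")) = b :=
    List.filter_eq_self.mpr (fun a ha => by simpa using hb a ha)
  have hfu : u.filter (fun item => !decide (item = "")) = u :=
    List.filter_eq_self.mpr (fun a ha => by simpa using hu a ha)
  simp [pvSt, PySem.Dict.insert, PySem.Dict.getD, PySem.Dict.get?, PySem.Dict.contains, hfn, hfb, hfu]
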